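-- pv_equiv track=rewrite | github.com/kyuhyeokGithub/SNU_computer_architecture | lab1/blur_int.py | blur
-- ===== SOURCE A (Python) =====
-- def blur(image, height, width, channels, kernel_size=5):
--     """
--     Blurs an image with a kernel and returns the blurred image.
--
--     Args:
--         image:        image data (multi-level list)
--         height:       image height
--         width:        image width
--         channels:     number of channels (BGR or BGRA)
--         kernel_size:  size of blurring kernel
--
--     Returns:
--         A tuple containing the following elements:
--         - blurred:    blurred image data
--         - bheight:    blurred image height
--         - bwidth:     blurred image width
--         - bchannels:  blurred image channels
--
--     """
--
--     # TODO
--     # Your work goes here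
--
--     # For now, we simply copy the input parameters into the output parameters.
--     # Fix/adjust once you have implemented your solution.
--
--     bheight = height + 1 - kernel_size
--     bwidth = width + 1 - kernel_size
--     bchannels = channels
--     blurred = []
--
--     weight_Q = 255 // (kernel_size ** 2)
--     weight_R = 255 - (kernel_size ** 2 - 1) * weight_Q
--     center = kernel_size >> 1
--
--     for h in range(bheight):
--         h_temp = []
--         for w in range(bwidth):
--             w_temp = []
--             for c in range(bchannels):
--                 temp = 0
--                 for x in range(kernel_size):
--                     for y in range(kernel_size):
--                         if x!=center or y!=center:
--                             temp += image[h+x][w+y][c]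
--                         else :
--                             temp1 = image[h+center][w+center][c]
--                 temp = temp * weight_Q
--                 temp += temp1 * weight_R
--                 temp = temp>>8
--                 w_temp.append(temp)
--             h_temp.append(w_temp)
--         blurred.append(h_temp)
--
--     return blurred, bheight, bwidth, bchannels
-- ===== SOURCE B (Python) =====
-- def blur(image, height, width, channels, kernel_size=5):
--     """Box blur with special-weighted center pixel, via a summed-area table
--     (integral image): each window sum is four table lookups plus a center correction."""
--     bheight = height + 1 - kernel_size
--     bwidth = width + 1 - kernel_size
--     bchannels = channels
--     k = kernel_size
--     weight_Q = 255 // (k * k)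
--     weight_R = 255 - (k * k - 1) * weight_Q
--     c0 = k >> 1
--
--     if bheight > 0 and bwidth > 0 and bchannels > 0:
--         C = bchannels
--         # summed-area table: I[i][j][c] = sum of image[p][q][c] for p < i, q < j
--         prev = [[0] * C for _ in range(width + 1)]
--         I = [prev]
--         for i in range(height):
--             row = image[i]
--             run = [0] * C
--             cur = [[0] * C]
--             for j in range(width):
--                 px = row[j]
--                 run = [run[c] + px[c] for c in range(C)]
--                 cur.append([prev[j + 1][c] + run[c] for c in range(C)])
--             I.append(cur)
--             prev = cur
--         blurred = []
--         for h in range(bheight):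
--             top = I[h]
--             bot = I[h + k]
--             h_temp = []
--             for w in range(bwidth):
--                 ctr = image[h + c0][w + c0]
--                 s = [bot[w + k][c] - top[w + k][c] - bot[w][c] + top[w][c]
--                      for c in range(C)]
--                 h_temp.append([(s[c] * weight_Q + ctr[c] * (weight_R - weight_Q)) >> 8
--                                for c in range(C)])
--             blurred.append(h_temp)
--     else:
--         blurred = [[[] for _ in range(bwidth)] for _ in range(bheight)]
--
--     return blurred, bheight, bwidth, bchannels
-- ===== Notes on version B (the rewrite author's own statement) =====
-- stated objective: alternative
-- what changed: B replaces A's per-pixel kernel_size x kernel_size double scan by a summed-area table (integral image) built once, so each output pixel's window sum is four table lookups plus a separate center-pixel correction.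
import Mathlib
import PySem

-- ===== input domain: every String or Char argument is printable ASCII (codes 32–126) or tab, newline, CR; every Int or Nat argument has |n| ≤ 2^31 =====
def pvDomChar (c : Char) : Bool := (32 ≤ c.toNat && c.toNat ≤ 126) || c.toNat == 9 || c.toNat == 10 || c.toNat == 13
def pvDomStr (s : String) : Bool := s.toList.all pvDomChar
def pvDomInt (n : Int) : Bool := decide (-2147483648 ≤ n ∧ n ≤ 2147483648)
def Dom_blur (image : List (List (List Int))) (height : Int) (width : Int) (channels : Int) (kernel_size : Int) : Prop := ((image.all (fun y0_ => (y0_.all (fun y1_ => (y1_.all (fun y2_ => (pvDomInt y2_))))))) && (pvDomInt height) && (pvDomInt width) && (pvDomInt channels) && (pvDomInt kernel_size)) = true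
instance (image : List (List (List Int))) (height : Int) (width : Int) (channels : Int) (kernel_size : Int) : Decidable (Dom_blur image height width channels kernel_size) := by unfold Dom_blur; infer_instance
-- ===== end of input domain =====

-- B replaces A's per-pixel k×k scan by a summed-area table (integral image), so each
-- window sum is four table lookups; the center correction is added separately (alternative algorithm).

-- `image[i][j][c]` with default 0 outside the lists; both ports index pixels this way.
def pvPix (image : List (List (List Int))) (i j c : Int) : Int :=
  PySem.List.pyGetD (PySem.List.pyGetD (PySem.List.pyGetD image i []) j []) c 0

-- ===== PORT A =====
-- the innermost `for x in range(kernel_size): for y in range(kernel_size): …` double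
-- loop of A, carrying the pair (temp, temp1); temp1 starts at an arbitrary 0 (Python
-- leaves it unbound; under Pre_ it is always assigned before use)
def pvA_kloop (image : List (List (List Int))) (center : Int) (kernel_size : Int)
    (h w c : Int) : Int × Int :=
  (PySem.List.pyRange 0 kernel_size).foldl (fun st x =>
    (PySem.List.pyRange 0 kernel_size).foldl (fun (st : Int × Int) y =>
      if x ≠ center ∨ y ≠ center then
        (st.1 + pvPix image (h + x) (w + y) c, st.2)
      else
        (st.1, pvPix image (h + center) (w + center) c)) st) ((0 : Int), (0 : Int))

def blur (image : List (List (List Int))) (height : Int) (width : Int) (channels : Int) (kernel_size : Int) : List (List (List Int)) × Int × Int × Int :=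
  let bheight := height + 1 - kernel_size
  let bwidth := width + 1 - kernel_size
  let bchannels := channels
  let weight_Q := PySem.Int.floordiv 255 (kernel_size * kernel_size)
  let weight_R := 255 - (kernel_size * kernel_size - 1) * weight_Q
  let center := PySem.Int.floordiv kernel_size 2   -- kernel_size >> 1
  let blurred := (PySem.List.pyRange 0 bheight).foldl (fun blurred h =>
    blurred ++ [(PySem.List.pyRange 0 bwidth).foldl (fun h_temp w =>
      h_temp ++ [(PySem.List.pyRange 0 bchannels).foldl (fun w_temp c =>
        let st := pvA_kloop image center kernel_size h w c
        w_temp ++ [PySem.Int.floordiv (st.1 * weight_Q + st.2 * weight_R) 256]) []]) []]) []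
  (blurred, bheight, bwidth, bchannels)

-- ===== PORT B =====
-- inner `for j in range(width)` loop of Source B: extends the integral-image row `cur`
-- and the running row sum `run`
def pvB_rowLoop (row : List (List Int)) (prev : List (List Int)) (C width : Int)
    (zeros : List Int) : List (List Int) × List Int :=
  (PySem.List.pyRange 0 width).foldl (fun (st : List (List Int) × List Int) j =>
    let px := PySem.List.pyGetD row j []
    let run := (PySem.List.pyRange 0 C).map (fun c =>
      PySem.List.pyGetD st.2 c 0 + PySem.List.pyGetD px c 0)
    (st.1 ++ [(PySem.List.pyRange 0 C).map (fun c =>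
      PySem.List.pyGetD (PySem.List.pyGetD prev (j + 1) []) c 0 + PySem.List.pyGetD run c 0)],
     run)) ([zeros], zeros)

-- outer `for i in range(height)` loop of Source B: builds the summed-area table I
def pvB_table (image : List (List (List Int))) (C height width : Int)
    (zeros : List Int) (prev0 : List (List Int)) : List (List (List Int)) × List (List Int) :=
  (PySem.List.pyRange 0 height).foldl (fun st i =>
    let cur := (pvB_rowLoop (PySem.List.pyGetD image i []) st.2 C width zeros).1
    (st.1 ++ [cur], cur)) ([prev0], prev0)

def blur_alt (image : List (List (List Int))) (height : Int) (width : Int) (channels : Int) (kernel_size : Int) : List (List (List Int)) × Int × Int × Int :=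
  let bheight := height + 1 - kernel_size
  let bwidth := width + 1 - kernel_size
  let bchannels := channels
  let k := kernel_size
  let weight_Q := PySem.Int.floordiv 255 (k * k)
  let weight_R := 255 - (k * k - 1) * weight_Q
  let c0 := PySem.Int.floordiv k 2   -- k >> 1
  if 0 < bheight ∧ 0 < bwidth ∧ 0 < bchannels then
    let C := bchannels
    let zeros := List.replicate C.toNat (0 : Int)   -- [0] * C
    let prev0 := (PySem.List.pyRange 0 (width + 1)).map (fun _ => zeros)
    let I := (pvB_table image C height width zeros prev0).1
    let blurred := (PySem.List.pyRange 0 bheight).foldl (fun blurred h =>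
      let top := PySem.List.pyGetD I h []
      let bot := PySem.List.pyGetD I (h + k) []
      blurred ++ [(PySem.List.pyRange 0 bwidth).foldl (fun h_temp w =>
        let ctr := PySem.List.pyGetD (PySem.List.pyGetD image (h + c0) []) (w + c0) []
        let s := (PySem.List.pyRange 0 C).map (fun c =>
          PySem.List.pyGetD (PySem.List.pyGetD bot (w + k) []) c 0
          - PySem.List.pyGetD (PySem.List.pyGetD top (w + k) []) c 0
          - PySem.List.pyGetD (PySem.List.pyGetD bot w []) c 0
          + PySem.List.pyGetD (PySem.List.pyGetD top w []) c 0)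
        h_temp ++ [(PySem.List.pyRange 0 C).map (fun c =>
          PySem.Int.floordiv (PySem.List.pyGetD s c 0 * weight_Q
            + PySem.List.pyGetD ctr c 0 * (weight_R - weight_Q)) 256)]) []]) []
    (blurred, bheight, bwidth, bchannels)
  else
    ((PySem.List.pyRange 0 bheight).map (fun _ =>
      (PySem.List.pyRange 0 bwidth).map (fun _ => ([] : List Int))),
     bheight, bwidth, bchannels)

-- ===== PRECONDITION & SPEC =====
-- Pre_ = exactly the inputs where Python A returns: kernel_size ≠ 0 (else ZeroDivisionError),
-- and either the output is empty (the loops never index) or kernel_size ≥ 1 (else temp1 is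
-- unbound: NameError) and the indexed region of `image` is present (else IndexError).
def Pre_blur (image : List (List (List Int))) (height : Int) (width : Int) (channels : Int) (kernel_size : Int) : Prop :=
  kernel_size ≠ 0 ∧
  (height + 1 - kernel_size ≤ 0 ∨ width + 1 - kernel_size ≤ 0 ∨ channels ≤ 0 ∨
    (1 ≤ kernel_size ∧ height ≤ (image.length : Int) ∧
      ∀ row ∈ image.take height.toNat, width ≤ (row.length : Int) ∧
        ∀ px ∈ row.take width.toNat, channels ≤ (px.length : Int)))
instance (image : List (List (List Int))) (height : Int) (width : Int) (channels : Int) (kernel_size : Int) : Decidable (Pre_blur image height width channels kernel_size) := by unfold Pre_blur; infer_instance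

def pvWitness_blur : List (List (List Int)) × Int × Int × Int × Int :=
  ([[[300], [40]], [[7], [9]]], 2, 2, 1, 2)

def Spec_blur (image : List (List (List Int))) (height : Int) (width : Int) (channels : Int) (kernel_size : Int) (out : List (List (List Int)) × Int × Int × Int) : Prop := out = blur_alt image height width channels kernel_size
instance (image : List (List (List Int))) (height : Int) (width : Int) (channels : Int) (kernel_size : Int) (out : List (List (List Int)) × Int × Int × Int) : Decidable (Spec_blur image height width channels kernel_size out) := by unfold Spec_blur; infer_instance

-- ===== CLAIM (what is proved, stated in full; the proofs are below) =====
def Claim_equal_blur : Prop := ∀ (image : List (List (List Int))) (height : Int) (width : Int) (channels : Int) (kernel_size : Int), Dom_blur image height width channels kernel_size → Pre_blur image height width channels kernel_size → Spec_blur image height width channels kernel_size (blur image height width channels kernel_size)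

-- ===== LEMMAS AND PROOFS =====

-- double sum of g over [0,i) × [0,j): the value of the summed-area table at (i,j)
def pvP (g : Int → Int → Int) (i j : Int) : Int :=
  ((PySem.List.pyRange 0 i).map (fun p => ((PySem.List.pyRange 0 j).map (fun q => g p q)).sum)).sum

def pvEnt (image : List (List (List Int))) (C i j : Int) : List Int :=
  (PySem.List.pyRange 0 C).map (fun c => pvP (fun p q => pvPix image p q c) i j)

def pvRowT (image : List (List (List Int))) (C width i : Int) : List (List Int) :=
  (PySem.List.pyRange 0 (width + 1)).map (fun j => pvEnt image C i j)

lemma pv_zeros (C : Int) :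
    (PySem.List.pyRange 0 C).map (fun _ => (0 : Int)) = List.replicate C.toNat 0 := by
  rw [List.map_const']
  simp [PySem.List.length_pyRange_one]

lemma pvP_left_zero (g : Int → Int → Int) (j : Int) : pvP g 0 j = 0 := by
  simp [pvP, PySem.List.pyRange_one_eq_nil (le_refl 0)]

lemma pvP_right_zero (g : Int → Int → Int) (i : Int) : pvP g i 0 = 0 := by
  simp [pvP, PySem.List.pyRange_one_eq_nil (le_refl 0)]

lemma pvP_succ_left (g : Int → Int → Int) (i j : Int) (hi : 0 ≤ i) :
    pvP g (i + 1) j = pvP g i j + ((PySem.List.pyRange 0 j).map (fun q => g i q)).sum := by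
  unfold pvP
  rw [PySem.List.pyRange_one_succ_right hi]
  simp

lemma pv_rowsum_succ (F : Int → Int) (j : Int) (hj : 0 ≤ j) :
    ((PySem.List.pyRange 0 (j + 1)).map F).sum
      = ((PySem.List.pyRange 0 j).map F).sum + F j := by
  rw [PySem.List.pyRange_one_succ_right hj]
  simp

lemma pvRowT_zero (image : List (List (List Int))) (C width : Int) :
    pvRowT image C width 0
      = (PySem.List.pyRange 0 (width + 1)).map (fun _ => List.replicate C.toNat 0) := by
  unfold pvRowT pvEnt
  refine List.map_congr_left (fun j hj => ?_)
  simp only [pvP_left_zero]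
  exact pv_zeros C

lemma pvB_rowLoop_inv (image : List (List (List Int))) (C width i : Int)
    (hi : 0 ≤ i) (n : Nat) (hn : (n : Int) ≤ width) :
    pvB_rowLoop (PySem.List.pyGetD image i []) (pvRowT image C width i) C (n : Int)
        (List.replicate C.toNat 0)
      = ((PySem.List.pyRange 0 ((n : Int) + 1)).map (fun j => pvEnt image C (i + 1) j),
         (PySem.List.pyRange 0 C).map (fun c =>
           ((PySem.List.pyRange 0 (n : Int)).map (fun q => pvPix image i q c)).sum)) := by
  induction n with
  | zero =>
    unfold pvB_rowLoop
    rw [show ((0 : Nat) : Int) = 0 from rfl, PySem.List.pyRange_one_eq_nil (le_refl 0)]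
    simp only [List.foldl_nil]
    refine Prod.ext ?_ ?_
    · rw [show PySem.List.pyRange (0:Int) (0 + 1) = [(0:Int)] from PySem.List.pyRange_one_singleton 0]
      simp [pvEnt, pvP_right_zero]
    · simp
  | succ n ih =>
    have h0n : (0 : Int) ≤ (n : Int) := by positivity
    have hn' : (n : Int) ≤ width := by push_cast at hn ⊢; omega
    unfold pvB_rowLoop at ih ⊢
    rw [show (((n + 1 : Nat)) : Int) = (n : Int) + 1 by push_cast; ring]
    rw [PySem.List.pyRange_one_succ_right h0n, List.foldl_append, ih hn']
    simp only [List.foldl_cons, List.foldl_nil]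
    have hrun : (PySem.List.pyRange 0 C).map (fun c =>
        PySem.List.pyGetD ((PySem.List.pyRange 0 C).map (fun c =>
          ((PySem.List.pyRange 0 (n : Int)).map (fun q => pvPix image i q c)).sum)) c 0
        + PySem.List.pyGetD (PySem.List.pyGetD (PySem.List.pyGetD image i []) (n : Int) []) c 0)
        = (PySem.List.pyRange 0 C).map (fun c =>
          ((PySem.List.pyRange 0 ((n : Int) + 1)).map (fun q => pvPix image i q c)).sum) := by
      refine List.map_congr_left (fun c hc => ?_)
      rcases PySem.List.mem_pyRange_one.mp hc with ⟨hc0, hcC⟩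
      rw [PySem.List.pyGetD_map_pyRange_of_nonneg _ C c 0 hc0 hcC]
      rw [pv_rowsum_succ _ (n : Int) h0n]
      rfl
    have hprev : PySem.List.pyGetD (pvRowT image C width i) ((n : Int) + 1) []
        = pvEnt image C i ((n : Int) + 1) := by
      simp only [pvRowT]
      exact PySem.List.pyGetD_map_pyRange_of_nonneg _ (width + 1) _ [] (by omega)
        (by push_cast at hn; omega)
    have hentry : (PySem.List.pyRange 0 C).map (fun c =>
        PySem.List.pyGetD (pvEnt image C i ((n : Int) + 1)) c 0 +
        PySem.List.pyGetD ((PySem.List.pyRange 0 C).map (fun c =>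
          ((PySem.List.pyRange 0 ((n : Int) + 1)).map (fun q => pvPix image i q c)).sum)) c 0)
        = pvEnt image C (i + 1) ((n : Int) + 1) := by
      simp only [pvEnt]
      refine List.map_congr_left (fun c hc => ?_)
      rcases PySem.List.mem_pyRange_one.mp hc with ⟨hc0, hcC⟩
      rw [PySem.List.pyGetD_map_pyRange_of_nonneg _ C c 0 hc0 hcC,
          PySem.List.pyGetD_map_pyRange_of_nonneg _ C c 0 hc0 hcC,
          pvP_succ_left (fun p q => pvPix image p q c) i ((n : Int) + 1) hi]
    have hlist : (PySem.List.pyRange 0 ((n : Int) + 1)).map (fun j => pvEnt image C (i + 1) j)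
          ++ [pvEnt image C (i + 1) ((n : Int) + 1)]
        = (PySem.List.pyRange 0 ((n : Int) + 1 + 1)).map (fun j => pvEnt image C (i + 1) j) := by
      rw [PySem.List.pyRange_one_succ_right (by omega : (0 : Int) ≤ (n : Int) + 1), List.map_append]
      rfl
    rw [hrun, hprev, hentry, hlist, ← PySem.List.pyRange_one_succ_right h0n]

lemma pvB_table_inv (image : List (List (List Int))) (C width : Int) (hw : 0 ≤ width) (m : Nat) :
    pvB_table image C (m : Int) width (List.replicate C.toNat 0)
        ((PySem.List.pyRange 0 (width + 1)).map (fun _ => List.replicate C.toNat 0))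
      = ((PySem.List.pyRange 0 ((m : Int) + 1)).map (fun i => pvRowT image C width i),
         pvRowT image C width (m : Int)) := by
  induction m with
  | zero =>
    unfold pvB_table
    rw [show ((0 : Nat) : Int) = 0 from rfl, PySem.List.pyRange_one_eq_nil (le_refl 0)]
    simp only [List.foldl_nil]
    rw [show PySem.List.pyRange (0:Int) (0 + 1) = [(0:Int)] from PySem.List.pyRange_one_singleton 0]
    rw [List.map_cons, List.map_nil, pvRowT_zero]
  | succ m ih =>
    have h0m : (0 : Int) ≤ (m : Int) := by positivity
    unfold pvB_table at ih ⊢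
    rw [show (((m + 1 : Nat)) : Int) = (m : Int) + 1 by push_cast; ring]
    rw [PySem.List.pyRange_one_succ_right h0m, List.foldl_append, ih]
    simp only [List.foldl_cons, List.foldl_nil]
    have hcur : (pvB_rowLoop (PySem.List.pyGetD image (m : Int) [])
          (pvRowT image C width (m : Int)) C width (List.replicate C.toNat 0)).1
        = pvRowT image C width ((m : Int) + 1) := by
      have hinv := pvB_rowLoop_inv image C width (m : Int) h0m width.toNat (by omega)
      rw [show ((width.toNat : Int)) = width by omega] at hinv
      rw [hinv]
      rfl
    rw [hcur]
    rw [PySem.List.pyRange_one_succ_right (by omega : (0 : Int) ≤ (m : Int) + 1), List.map_append]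
    rfl

lemma pv_sum_map_sub (f g : Int → Int) (L : List Int) :
    (L.map f).sum - (L.map g).sum = (L.map (fun x => f x - g x)).sum := by
  induction L with
  | nil => simp
  | cons a L ih => simp only [List.map_cons, List.sum_cons, ← ih]; ring

lemma pv_pyRange_shift (a k : Int) :
    PySem.List.pyRange a (a + k) = (PySem.List.pyRange 0 k).map (fun x => a + x) := by
  rw [PySem.List.pyRange_one a (a + k), PySem.List.pyRange_one 0 k, List.map_map]
  rw [show a + k - a = k - 0 by ring]
  refine List.map_congr_left (fun m _ => ?_)
  simp

lemma pv_sum_shift (F : Int → Int) (a k : Int) :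
    ((PySem.List.pyRange a (a + k)).map F).sum
      = ((PySem.List.pyRange 0 k).map (fun x => F (a + x))).sum := by
  rw [pv_pyRange_shift, List.map_map]
  rfl

lemma pv_split_sum (F : Int → Int) (a b : Int) (h1 : 0 ≤ a) (h2 : a ≤ b) :
    ((PySem.List.pyRange 0 b).map F).sum
      = ((PySem.List.pyRange 0 a).map F).sum + ((PySem.List.pyRange a b).map F).sum := by
  rw [PySem.List.pyRange_one_append 0 a b h1 h2, List.map_append, List.sum_append]

lemma pv_rect (g : Int → Int → Int) (h w k : Int) (hh : 0 ≤ h) (hw : 0 ≤ w) (hk : 0 ≤ k) :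
    pvP g (h + k) (w + k) - pvP g h (w + k) - pvP g (h + k) w + pvP g h w
      = ((PySem.List.pyRange 0 k).map (fun x =>
          ((PySem.List.pyRange 0 k).map (fun y => g (h + x) (w + y))).sum)).sum := by
  unfold pvP
  rw [pv_split_sum (fun p => ((PySem.List.pyRange 0 (w + k)).map (fun q => g p q)).sum)
      h (h + k) hh (by omega)]
  rw [pv_split_sum (fun p => ((PySem.List.pyRange 0 w).map (fun q => g p q)).sum)
      h (h + k) hh (by omega)]
  have hgoal : ∀ X S1 Y S2 R : Int, S1 - S2 = R → (X + S1) - X - (Y + S2) + Y = R := by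
    intro X S1 Y S2 R hr; omega
  apply hgoal
  rw [pv_sum_map_sub]
  rw [List.map_congr_left (l := PySem.List.pyRange h (h + k))
    (f := fun p => ((PySem.List.pyRange 0 (w + k)).map (fun q => g p q)).sum
      - ((PySem.List.pyRange 0 w).map (fun q => g p q)).sum)
    (g := fun p => ((PySem.List.pyRange w (w + k)).map (fun q => g p q)).sum)
    (fun p _ => by
      dsimp only
      rw [pv_split_sum (fun q => g p q) w (w + k) hw (by omega)]
      ring)]
  rw [pv_sum_shift (fun p => ((PySem.List.pyRange w (w + k)).map (fun q => g p q)).sum) h k]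
  refine congrArg List.sum (List.map_congr_left (fun x _ => ?_))
  exact pv_sum_shift (fun q => g (h + x) q) w k

lemma pv_foldl_add (F : Int → Int) (L : List Int) (t t1 : Int) :
    L.foldl (fun (st : Int × Int) y => (st.1 + F y, st.2)) (t, t1)
      = (t + (L.map F).sum, t1) := by
  induction L generalizing t with
  | nil => simp
  | cons a L ih => simp [ih, add_assoc]

lemma pv_foldl_special (F : Int → Int) (c0 d B : Int) (L : List Int)
    (hnd : L.Nodup) (hc : c0 ∈ L) (t t1 : Int) :
    L.foldl (fun (st : Int × Int) y =>
        if y ≠ c0 then (st.1 + F y, st.2) else (st.1 + F c0 - d, B)) (t, t1)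
      = (t + (L.map F).sum - d, B) := by
  induction L generalizing t t1 with
  | nil => cases hc
  | cons a L ih =>
    rcases List.nodup_cons.mp hnd with ⟨ha, hnd'⟩
    by_cases hac : a = c0
    · subst hac
      rw [List.foldl_cons]
      show L.foldl _ (if a ≠ a then (t + F a, t1) else (t + F a - d, B)) = _
      rw [if_neg (not_not_intro rfl)]
      rw [PySem.List.foldl_congr_mem L _ (fun (st : Int × Int) y => (st.1 + F y, st.2))
        _ (by intro acc x hx; dsimp only; rw [if_pos]; intro hxa; exact ha (hxa ▸ hx))]
      rw [pv_foldl_add F L _ B]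
      simp only [List.map_cons, List.sum_cons]
      congr 1
      ring
    · have hcL : c0 ∈ L := by
        rcases List.mem_cons.mp hc with h | h
        · exact absurd h.symm hac
        · exact h
      rw [List.foldl_cons]
      show L.foldl _ (if a ≠ c0 then (t + F a, t1) else (t + F c0 - d, B)) = _
      rw [if_pos hac]
      rw [ih hnd' hcL]
      simp only [List.map_cons, List.sum_cons]
      congr 1
      ring

lemma pvA_kloop_eq (image : List (List (List Int))) (k c0 : Int)
    (hc0 : 0 ≤ c0) (hc0' : c0 < k) (h w c : Int) :
    pvA_kloop image c0 k h w c =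
      (((PySem.List.pyRange 0 k).map (fun x =>
          ((PySem.List.pyRange 0 k).map (fun y => pvPix image (h + x) (w + y) c)).sum)).sum
        - pvPix image (h + c0) (w + c0) c,
       pvPix image (h + c0) (w + c0) c) := by
  unfold pvA_kloop
  have hmem : c0 ∈ PySem.List.pyRange 0 k := PySem.List.mem_pyRange_one.mpr ⟨hc0, hc0'⟩
  rw [PySem.List.foldl_congr_mem _ _ (fun (st : Int × Int) x =>
      if x ≠ c0 then (st.1 + ((PySem.List.pyRange 0 k).map (fun y => pvPix image (h + x) (w + y) c)).sum, st.2)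
      else (st.1 + ((PySem.List.pyRange 0 k).map (fun y => pvPix image (h + c0) (w + y) c)).sum
              - pvPix image (h + c0) (w + c0) c, pvPix image (h + c0) (w + c0) c)) _ ?_]
  · rw [pv_foldl_special _ c0 (pvPix image (h + c0) (w + c0) c)
      (pvPix image (h + c0) (w + c0) c) _ (PySem.List.nodup_pyRange_one 0 k) hmem]
    simp
  · intro acc x hx
    dsimp only
    by_cases hxc : x = c0
    · subst hxc
      rw [if_neg (not_not_intro rfl)]
      rw [PySem.List.foldl_congr_mem _ _ (fun (st : Int × Int) y =>
          if y ≠ x then (st.1 + pvPix image (h + x) (w + y) c, st.2)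
          else (st.1 + pvPix image (h + x) (w + x) c - pvPix image (h + x) (w + x) c,
                pvPix image (h + x) (w + x) c)) _ ?_]
      · rw [pv_foldl_special _ x (pvPix image (h + x) (w + x) c)
          (pvPix image (h + x) (w + x) c) _ (PySem.List.nodup_pyRange_one 0 k) hmem]
      · intro acc' y hy
        dsimp only
        by_cases hyc : y = x
        · subst hyc; simp
        · simp [hyc]
    · rw [if_pos hxc]
      rw [PySem.List.foldl_congr_mem _ _ (fun (st : Int × Int) y =>
          (st.1 + pvPix image (h + x) (w + y) c, st.2)) _
          (by intro acc' y hy; simp [hxc])]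
      exact pv_foldl_add _ _ _ _


-- ===== VERDICT =====
theorem blur_spec : Claim_equal_blur := by
  intro image height width channels kernel_size hdom hpre
  unfold Spec_blur
  rcases hpre with ⟨hk0, hcase⟩
  by_cases hmain : 0 < height + 1 - kernel_size ∧ 0 < width + 1 - kernel_size ∧ 0 < channels
  · -- main case: nonempty output
    have hk1 : 1 ≤ kernel_size := by
      rcases hcase with h | h | h | h
      · omega
      · omega
      · omega
      · exact h.1
    have hc0 : 0 ≤ PySem.Int.floordiv kernel_size 2 ∧
        PySem.Int.floordiv kernel_size 2 < kernel_size := by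
      rw [show PySem.Int.floordiv kernel_size 2 = kernel_size / 2 by
        rw [show PySem.Int.floordiv kernel_size 2 = Int.fdiv kernel_size 2 from rfl,
          Int.fdiv_eq_ediv]
        simp]
      omega
    obtain ⟨hbh, hbw, hch⟩ := hmain
    have hH : 0 ≤ height := by omega
    have hW : 0 ≤ width := by omega
    simp only [blur, blur_alt, if_pos (⟨hbh, hbw, hch⟩ : 0 < height + 1 - kernel_size ∧ 0 < width + 1 - kernel_size ∧ 0 < channels)]
    refine Prod.ext ?_ rfl
    have htab : (pvB_table image channels height width (List.replicate channels.toNat 0)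
        ((PySem.List.pyRange 0 (width + 1)).map (fun _ => List.replicate channels.toNat 0))).1
        = (PySem.List.pyRange 0 (height + 1)).map (fun i => pvRowT image channels width i) := by
      have hh := pvB_table_inv image channels width hW height.toNat
      rw [show ((height.toNat : Int)) = height by omega] at hh
      rw [hh]
    rw [htab]
    simp only [PySem.List.foldl_append_singleton_eq_map, List.nil_append]
    refine List.map_congr_left (fun h hmemh => ?_)
    rcases PySem.List.mem_pyRange_one.mp hmemh with ⟨hh0, hhb⟩
    rw [PySem.List.pyGetD_map_pyRange_of_nonneg (fun i => pvRowT image channels width i)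
      (height + 1) h [] hh0 (by omega)]
    rw [PySem.List.pyGetD_map_pyRange_of_nonneg (fun i => pvRowT image channels width i)
      (height + 1) (h + kernel_size) [] (by omega) (by omega)]
    refine List.map_congr_left (fun w hmemw => ?_)
    rcases PySem.List.mem_pyRange_one.mp hmemw with ⟨hw0, hwb⟩
    simp only [pvRowT]
    rw [PySem.List.pyGetD_map_pyRange_of_nonneg (fun j => pvEnt image channels h j)
      (width + 1) (w + kernel_size) [] (by omega) (by omega)]
    rw [PySem.List.pyGetD_map_pyRange_of_nonneg (fun j => pvEnt image channels h j)
      (width + 1) w [] hw0 (by omega)]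
    rw [PySem.List.pyGetD_map_pyRange_of_nonneg (fun j => pvEnt image channels (h + kernel_size) j)
      (width + 1) (w + kernel_size) [] (by omega) (by omega)]
    rw [PySem.List.pyGetD_map_pyRange_of_nonneg (fun j => pvEnt image channels (h + kernel_size) j)
      (width + 1) w [] hw0 (by omega)]
    refine List.map_congr_left (fun c hmemc => ?_)
    rcases PySem.List.mem_pyRange_one.mp hmemc with ⟨hcc0, hccb⟩
    rw [pvA_kloop_eq image kernel_size (PySem.Int.floordiv kernel_size 2) hc0.1 hc0.2 h w c]
    rw [PySem.List.pyGetD_map_pyRange_of_nonneg _ channels c 0 hcc0 hccb]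
    simp only [pvEnt]
    rw [PySem.List.pyGetD_map_pyRange_of_nonneg _ channels c 0 hcc0 hccb,
        PySem.List.pyGetD_map_pyRange_of_nonneg _ channels c 0 hcc0 hccb,
        PySem.List.pyGetD_map_pyRange_of_nonneg _ channels c 0 hcc0 hccb,
        PySem.List.pyGetD_map_pyRange_of_nonneg _ channels c 0 hcc0 hccb]
    rw [pv_rect (fun p q => pvPix image p q c) h w kernel_size hh0 hw0 (by omega)]
    simp only [pvPix]
    congr 1
    ring
  · -- degenerate case: empty output
    have hdeg : height + 1 - kernel_size ≤ 0 ∨ width + 1 - kernel_size ≤ 0 ∨ channels ≤ 0 := by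
      by_contra hcon
      push Not at hcon
      exact hmain ⟨by omega, by omega, by omega⟩
    simp only [blur, blur_alt, if_neg hmain]
    simp only [PySem.List.foldl_append_singleton_eq_map, List.nil_append]
    refine Prod.ext ?_ rfl
    rcases hdeg with hd | hd | hd
    · rw [PySem.List.pyRange_one_eq_nil hd]
      rfl
    · refine List.map_congr_left (fun h _ => ?_)
      rw [PySem.List.pyRange_one_eq_nil hd]
      rfl
    · refine List.map_congr_left (fun h _ => ?_)
      refine List.map_congr_left (fun w _ => ?_)
      rw [PySem.List.pyRange_one_eq_nil hd]
      rfl
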